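-- pv_equiv track=rewrite | github.com/ognjhunt/BlueprintPipeline | interactive-job/run_interactive_assets.py | collect_result_payloads
-- ===== SOURCE A (Python) =====
-- from typing import Any, Dict, List, Optional, Tuple
--
-- def collect_result_payloads(results: List[Dict[str, Any]]) -> Tuple[List[Dict[str, Any]], List[Dict[str, Any]]]:
--     """Collect structured error/warning payloads for workflows."""
--     errors = []
--     warnings = []
--     for result in results:
--         status = result.get("status")
--         payload = {
--             "id": result.get("id"),
--             "status": status,
--             "error": result.get("error"),
--         }
--         if status == "error":
--             errors.append(payload)
--         elif status in {"fallback", "static"}: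
--             warnings.append(payload)
--     return errors, warnings
-- ===== SOURCE B (Python) =====
-- from typing import Any, Dict, List, Tuple
--
-- def collect_result_payloads(results: List[Dict[str, Any]]) -> Tuple[List[Dict[str, Any]], List[Dict[str, Any]]]:
--     """Collect structured error/warning payloads for workflows (two independent passes)."""
--     def payload(result):
--         return {"id": result.get("id"), "status": result.get("status"), "error": result.get("error")}
--     errors = [payload(r) for r in results if r.get("status") == "error"]
--     warnings = [payload(r) for r in results if r.get("status") in {"fallback", "static"}]
--     return errors, warnings
-- ===== Notes on version B (the rewrite author's own statement) =====
-- stated objective: simpler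
-- what changed: Replaces the single dispatching accumulator loop with two independent filtering comprehensions, one per output list, via a shared payload helper.
import Mathlib
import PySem

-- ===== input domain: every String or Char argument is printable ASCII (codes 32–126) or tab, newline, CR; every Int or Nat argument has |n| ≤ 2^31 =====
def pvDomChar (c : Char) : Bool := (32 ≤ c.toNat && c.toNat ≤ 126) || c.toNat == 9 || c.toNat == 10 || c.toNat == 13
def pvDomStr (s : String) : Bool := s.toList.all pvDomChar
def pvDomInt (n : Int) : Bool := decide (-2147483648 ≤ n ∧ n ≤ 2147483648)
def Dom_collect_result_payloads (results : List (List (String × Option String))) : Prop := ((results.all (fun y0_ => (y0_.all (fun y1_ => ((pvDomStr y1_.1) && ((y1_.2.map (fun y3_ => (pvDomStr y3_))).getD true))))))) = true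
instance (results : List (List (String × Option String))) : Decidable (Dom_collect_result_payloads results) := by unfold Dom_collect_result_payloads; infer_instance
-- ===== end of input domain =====

-- B replaces A's single dispatching accumulator loop with two independent filtering passes; objective: simpler.

-- ===== PORT A =====
-- result.get(k): first match in the association list, default None (exact for a dict of Optional[str] values)
def pvGet (r : List (String × Option String)) (k : String) : Option String :=
  match r.find? (fun p => p.1 == k) with
  | some p => p.2
  | none => none

def collect_result_payloads (results : List (List (String × Option String))) : (List (List (String × Option String))) × (List (List (String × Option String))) :=
  results.foldl (fun acc result =>
    let status := pvGet result "status"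
    let payload := [("id", pvGet result "id"), ("status", status), ("error", pvGet result "error")]
    if status = some "error" then (acc.1 ++ [payload], acc.2)
    else if status = some "fallback" ∨ status = some "static" then (acc.1, acc.2 ++ [payload])
    else acc) ([], [])

-- ===== PORT B =====
def pvPayload (result : List (String × Option String)) : List (String × Option String) :=
  [("id", pvGet result "id"), ("status", pvGet result "status"), ("error", pvGet result "error")]

def collect_result_payloads_alt (results : List (List (String × Option String))) : (List (List (String × Option String))) × (List (List (String × Option String))) :=
  ((results.filter (fun r => pvGet r "status" == some "error")).map pvPayload,
   (results.filter (fun r => pvGet r "status" == some "fallback" || pvGet r "status" == some "static")).map pvPayload)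

-- ===== PRECONDITION & SPEC =====
def Spec_collect_result_payloads (results : List (List (String × Option String))) (out : (List (List (String × Option String))) × (List (List (String × Option String)))) : Prop := out = collect_result_payloads_alt results
instance (results : List (List (String × Option String))) (out : (List (List (String × Option String))) × (List (List (String × Option String)))) : Decidable (Spec_collect_result_payloads results out) := by unfold Spec_collect_result_payloads; infer_instance

-- ===== CLAIM (what is proved, stated in full; the proofs are below) =====
def Claim_equal_collect_result_payloads : Prop := ∀ (results : List (List (String × Option String))), Dom_collect_result_payloads results → Spec_collect_result_payloads results (collect_result_payloads results)

-- ===== LEMMAS AND PROOFS =====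

-- A's loop with accumulator (e, w) appends B's two filtered-mapped lists.
theorem collect_loop_eq (results : List (List (String × Option String)))
    (e w : List (List (String × Option String))) :
    results.foldl (fun acc result =>
      let status := pvGet result "status"
      let payload := [("id", pvGet result "id"), ("status", status), ("error", pvGet result "error")]
      if status = some "error" then (acc.1 ++ [payload], acc.2)
      else if status = some "fallback" ∨ status = some "static" then (acc.1, acc.2 ++ [payload])
      else acc) (e, w)
    = (e ++ (results.filter (fun r => pvGet r "status" == some "error")).map pvPayload,
       w ++ (results.filter (fun r => pvGet r "status" == some "fallback" || pvGet r "status" == some "static")).map pvPayload) := by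
  induction results generalizing e w with
  | nil => simp
  | cons r rs ih =>
    simp only [List.foldl_cons]
    by_cases h1 : pvGet r "status" = some "error"
    · simp [h1, ih, pvPayload]
    · by_cases h2 : pvGet r "status" = some "fallback" ∨ pvGet r "status" = some "static"
      · have hne : ¬ (pvGet r "status" == some "error") := by simp [h1]
        have hor : (pvGet r "status" == some "fallback" || pvGet r "status" == some "static") = true := by
          rcases h2 with h | h <;> simp [h]
        simp [h1, h2, hne, hor, ih, pvPayload]
      · have hne : ¬ (pvGet r "status" == some "error") := by simp [h1]
        have hor : ¬ ((pvGet r "status" == some "fallback" || pvGet r "status" == some "static") = true) := by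
          simp only [Bool.or_eq_true, beq_iff_eq]; exact h2
        simp [h1, h2, hne, hor, ih]

-- ===== VERDICT (by name: the statement is the Claim_ definition above) =====
theorem collect_result_payloads_spec : Claim_equal_collect_result_payloads := by
  intro results _
  unfold Spec_collect_result_payloads collect_result_payloads collect_result_payloads_alt
  simpa using collect_loop_eq results [] []
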